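-- pv_equiv track=rewrite | github.com/Water-Stone/Baekjoon | 프로그래머스/lv2/17679. ［1차］ 프렌즈4블록/［1차］ 프렌즈4블록.py | solution
-- ===== SOURCE A (Python) =====
-- def solution(m, n, board):
--     # 블록 종류: R, M, A, F, N, T, J, C
--     cnt_crushed = 0
--
--     for i in range(m):
--         board[i] = list(board[i])
--
--     # 10
--     # 00 -> 1의 위치만 탐색해서 4개 블록 뭉치 확인
--     while True:
--         crush_idx = [[False for _ in range(n)] for _ in range(m)]
--         for i in range(m - 1):
--             for j in range(n - 1):
--                 if board[i][j] == ' ':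
--                     continue
--                 b00 = board[i][j]
--                 b01 = board[i][j + 1]
--                 b10 = board[i + 1][j]
--                 b11 = board[i + 1][j + 1]
--                 if b00 == b01 and b00 == b10 and b00 == b11:
--                     crush_idx[i][j] = True
--                     crush_idx[i][j + 1] = True
--                     crush_idx[i + 1][j] = True
--                     crush_idx[i + 1][j + 1] = True
--
--         tmpcnt = 0
--         for i in range(m):
--             tmpcnt += crush_idx[i].count(True)
--             if tmpcnt == 0:
--                 if i == m - 1:
--                     return cnt_crushed
--         cnt_crushed += tmpcnt
--
--         for i in range(m):
--             for j in range(n):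
--                 if crush_idx[i][j] == True:
--                     if i == 0:
--                         board[i][j] = ' '
--                     else:
--                         for level in range(i, 0, -1):
--                             board[level][j] = board[level - 1][j]
--                         board[0][j] = ' '
-- ===== SOURCE B (Python) =====
-- def solution(m, n, board):
--     # Return-value equivalence only: A mutates `board` in place (rows become char
--     # lists); B works on its own column-major copy and leaves `board` untouched.
--     cols = [[board[i][j] for i in range(m)] for j in range(n)]
--     removed = 0
--     while True:
--         marks = set()
--         for j in range(n - 1):
--             for i in range(m - 1):
--                 c = cols[j][i]
--                 if c != ' ' and cols[j + 1][i] == c and cols[j][i + 1] == c and cols[j + 1][i + 1] == c: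
--                     marks.update([(i, j), (i, j + 1), (i + 1, j), (i + 1, j + 1)])
--         if not marks:
--             return removed
--         removed += len(marks)
--         new_cols = []
--         for j in range(n):
--             col = cols[j]
--             kept = [col[i] for i in range(m) if (i, j) not in marks]
--             new_cols.append([' '] * (m - len(kept)) + kept)
--         cols = new_cols
-- ===== Notes on version B (the rewrite author's own statement) =====
-- stated objective: faster
-- what changed: B stores the board column-major and, instead of A's 2D boolean crush grid plus an O(m) downward shift of the column for every marked cell, collects marked cells in a set and rebuilds each column once per iteration (keep unmarked cells, pad spaces on top).
-- outside the precondition, e.g. on solution(1, 3, ['A']): A returns 0, B raises IndexError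
import Mathlib
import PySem

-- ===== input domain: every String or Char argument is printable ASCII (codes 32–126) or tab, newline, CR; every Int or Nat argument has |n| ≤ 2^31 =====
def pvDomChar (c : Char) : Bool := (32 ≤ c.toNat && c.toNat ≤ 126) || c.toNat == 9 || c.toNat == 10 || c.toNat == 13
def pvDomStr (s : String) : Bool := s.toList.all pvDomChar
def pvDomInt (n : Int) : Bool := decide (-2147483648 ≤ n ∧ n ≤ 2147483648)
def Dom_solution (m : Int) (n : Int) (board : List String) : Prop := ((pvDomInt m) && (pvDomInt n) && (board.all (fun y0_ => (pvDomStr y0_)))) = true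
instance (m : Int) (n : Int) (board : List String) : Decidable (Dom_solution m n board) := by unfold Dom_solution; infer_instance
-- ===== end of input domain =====

-- B replaces A's per-cell column shifting with one top-down compaction per column and
-- iteration (and a mark set instead of a 2D flag grid); return-value equivalence only:
-- A mutates `board` in place, B does not.

-- ===== PORT A =====

-- board[i][j] read; every index the ports issue is a pyRange value, in range under Pre_
def pvGet2 {α : Type} (g : List (List α)) (i j : Int) (d : α) : α :=
  PySem.List.pyGetD (PySem.List.pyGetD g i []) j d

-- board[i][j] = v; indices used are nonnegative and in range under Pre_ (Python would
-- raise IndexError out of range; those inputs are excluded by Pre_)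
def pvSet2 {α : Type} (g : List (List α)) (i j : Int) (v : α) : List (List α) :=
  g.modify i.toNat (fun r => r.set j.toNat v)

-- crush_idx := [[False]*n]*m, then the nested scan marking monochrome 2x2 squares
def pvCrushA (m n : Int) (b : List (List Char)) : List (List Bool) :=
  let init := (PySem.List.pyRange 0 m 1).map (fun _ => (PySem.List.pyRange 0 n 1).map (fun _ => false))
  (PySem.List.pyRange 0 (m - 1) 1).foldl (fun ci i =>
    (PySem.List.pyRange 0 (n - 1) 1).foldl (fun ci j =>
      if pvGet2 b i j ' ' = ' ' then ci
      else
        let b00 := pvGet2 b i j ' '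
        let b01 := pvGet2 b i (j + 1) ' '
        let b10 := pvGet2 b (i + 1) j ' '
        let b11 := pvGet2 b (i + 1) (j + 1) ' '
        if b00 = b01 ∧ b00 = b10 ∧ b00 = b11 then
          pvSet2 (pvSet2 (pvSet2 (pvSet2 ci i j true) i (j + 1) true) (i + 1) j true) (i + 1) (j + 1) true
        else ci) ci) init

-- the tmpcnt loop; second component records whether 'return cnt_crushed' fired
def pvCountA (m : Int) (ci : List (List Bool)) : Int × Bool :=
  (PySem.List.pyRange 0 m 1).foldl (fun acc i =>
    let t := acc.1 + (PySem.List.count (PySem.List.pyGetD ci i []) true : Int)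
    (t, acc.2 || (t == 0 && i == m - 1))) (0, false)

-- the gravity loop: per marked cell, shift its column down one place
def pvGravA (m n : Int) (ci : List (List Bool)) (b : List (List Char)) : List (List Char) :=
  (PySem.List.pyRange 0 m 1).foldl (fun b i =>
    (PySem.List.pyRange 0 n 1).foldl (fun b j =>
      if pvGet2 ci i j false = true then
        if i = 0 then pvSet2 b i j ' '
        else
          let b' := (PySem.List.pyRange i 0 (-1)).foldl (fun b level =>
            pvSet2 b level j (pvGet2 b (level - 1) j ' ')) b
          pvSet2 b' 0 j ' '
      else b) b) b

-- 'while True': on Pre_ inputs each non-final pass clears at least 4 blocks, so the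
-- loop body runs at most m*n+1 times; the fuel is never exhausted inside Pre_
def pvLoopA (m n : Int) : Nat → Int → List (List Char) → Int
  | 0, cnt, _ => cnt
  | fuel + 1, cnt, b =>
    let ci := pvCrushA m n b
    let tc := pvCountA m ci
    if tc.2 then cnt
    else pvLoopA m n fuel (cnt + tc.1) (pvGravA m n ci b)

def solution (m : Int) (n : Int) (board : List String) : Int :=
  -- 'for i in range(m): board[i] = list(board[i])': under Pre_ rows past the first m
  -- are never read again, so converting every row is exact
  pvLoopA m n (m.toNat * n.toNat + 1) 0 (board.map String.toList)

-- ===== PORT B =====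

-- mark set: corners of monochrome 2x2 squares, scanned column-major
def pvMarksB (m n : Int) (cols : List (List Char)) : PySem.Set (Int × Int) :=
  (PySem.List.pyRange 0 (n - 1) 1).foldl (fun s j =>
    (PySem.List.pyRange 0 (m - 1) 1).foldl (fun s i =>
      let c := pvGet2 cols j i ' '
      if c ≠ ' ' ∧ pvGet2 cols (j + 1) i ' ' = c ∧ pvGet2 cols j (i + 1) ' ' = c ∧
          pvGet2 cols (j + 1) (i + 1) ' ' = c then
        PySem.Set.update s [(i, j), (i, j + 1), (i + 1, j), (i + 1, j + 1)]
      else s) s) PySem.Set.empty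

-- one top-down compaction per column: keep unmarked cells, pad spaces on top
def pvCompactB (m n : Int) (marks : PySem.Set (Int × Int)) (cols : List (List Char)) : List (List Char) :=
  (PySem.List.pyRange 0 n 1).map (fun j =>
    let col := PySem.List.pyGetD cols j []
    let kept := ((PySem.List.pyRange 0 m 1).filter (fun i => !(PySem.Set.contains marks (i, j)))).map
      (fun i => PySem.List.pyGetD col i ' ')
    PySem.List.pyRepeat [' '] (m - (kept.length : Int)) ++ kept)

-- same 'while True' bound as A: at most m*n+1 passes inside Pre_
def pvLoopB (m n : Int) : Nat → Int → List (List Char) → Int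
  | 0, removed, _ => removed
  | fuel + 1, removed, cols =>
    let marks := pvMarksB m n cols
    if marks = [] then removed
    else pvLoopB m n fuel (removed + PySem.Set.len marks) (pvCompactB m n marks cols)

def solution_alt (m : Int) (n : Int) (board : List String) : Int :=
  pvLoopB m n (m.toNat * n.toNat + 1) 0
    ((PySem.List.pyRange 0 n 1).map (fun j =>
      (PySem.List.pyRange 0 m 1).map (fun i =>
        PySem.List.pyGetD (PySem.List.pyGetD board i "").toList j ' ')))

-- ===== PRECONDITION & SPEC =====
-- Pre_ excludes inputs where A never returns: with m < 1 A's 'while True' loop runs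
-- forever, and on boards with fewer than m rows, or whose first m rows are shorter
-- than n (when a 2x2 scan happens), A raises IndexError; when no 2x2 scan happens
-- (m = 1 or n <= 1) A returns 0 on such ragged boards while B's column copy raises,
-- so those stay excluded as well.  It also requires only
-- 'at least' m rows / n columns: A silently ignores extra rows and columns, and B
-- does the same, but exact trailing-garbage agreement is only claimed here.
def Pre_solution (m : Int) (n : Int) (board : List String) : Prop :=
  1 ≤ m ∧ m ≤ (board.length : Int) ∧ ∀ s ∈ board.take m.toNat, n ≤ (s.toList.length : Int)
instance (m : Int) (n : Int) (board : List String) : Decidable (Pre_solution m n board) := by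
  unfold Pre_solution; infer_instance

def pvWitness_solution : Int × Int × List String := (2, 3, ["AAB", "AAB"])

def Spec_solution (m : Int) (n : Int) (board : List String) (out : Int) : Prop := out = solution_alt m n board
instance (m : Int) (n : Int) (board : List String) (out : Int) : Decidable (Spec_solution m n board out) := by unfold Spec_solution; infer_instance

-- ===== CLAIM (what is proved, stated in full; the proofs are below) =====
def Claim_equal_solution : Prop := ∀ (m : Int) (n : Int) (board : List String), Dom_solution m n board → Pre_solution m n board → Spec_solution m n board (solution m n board)

-- ===== LEMMAS AND PROOFS =====

-- 2D grid access/update on the Nat side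
def ggD {α : Type} (g : List (List α)) (i j : Nat) (d : α) : α := (g.getD i []).getD j d
def gsD {α : Type} (g : List (List α)) (i j : Nat) (v : α) : List (List α) :=
  g.modify i (fun r => r.set j v)

def ShapeG (M N : Nat) (g : List (List Char)) : Prop :=
  M ≤ g.length ∧ ∀ i < M, N ≤ (g.getD i []).length

def monoB (g : List (List Char)) (p q : Nat) : Bool :=
  (ggD g p q ' ' != ' ') && (ggD g p (q+1) ' ' == ggD g p q ' ')
    && (ggD g (p+1) q ' ' == ggD g p q ' ') && (ggD g (p+1) (q+1) ' ' == ggD g p q ' ')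

def mkB (M N : Nat) (g : List (List Char)) (i j : Nat) : Bool :=
  (List.range (M-1)).any fun p => (List.range (N-1)).any fun q =>
    monoB g p q && (i == p || i == p+1) && (j == q || j == q+1)

def ccG (M N : Nat) (g : List (List Char)) : List (List Bool) :=
  (List.range M).map fun i => (List.range N).map fun j => mkB M N g i j

def totN (M N : Nat) (g : List (List Char)) : Nat :=
  ((List.range M).map fun i => (List.range N).countP fun j => mkB M N g i j).sum

def tG (M N : Nat) (g : List (List Char)) : List (List Char) :=
  (List.range N).map fun j => (List.range M).map fun i => ggD g i j ' '

def cntPre (M N : Nat) (g : List (List Char)) (i j : Nat) : Nat :=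
  (List.range i).countP fun i' => mkB M N g i' j

def keptPre (M N : Nat) (g : List (List Char)) (i j : Nat) : List Char :=
  ((List.range i).filter fun i' => !mkB M N g i' j).map fun i' => ggD g i' j ' '

def colVal (M N : Nat) (g : List (List Char)) (i j i' : Nat) : Char :=
  if i' < cntPre M N g i j then ' '
  else if i' < i then (keptPre M N g i j).getD (i' - cntPre M N g i j) ' '
  else ggD g i' j ' '

-- basic facts about ggD / gsD
lemma gs_length {α : Type} (g : List (List α)) (p q : Nat) (v : α) :
    (gsD g p q v).length = g.length := by
  simp [gsD]

lemma gs_row_length {α : Type} (g : List (List α)) (p q i : Nat) (v : α) :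
    ((gsD g p q v).getD i []).length = (g.getD i []).length := by
  simp only [gsD, List.getD_eq_getElem?_getD, List.getElem?_modify]
  cases h : g[i]? with
  | none => by_cases hp : p = i <;> simp [hp, h]
  | some r => by_cases hp : p = i <;> simp [hp, h]

lemma gg_gs_ne {α : Type} (g : List (List α)) (p q i j : Nat) (v d : α)
    (h : i ≠ p ∨ j ≠ q) : ggD (gsD g p q v) i j d = ggD g i j d := by
  simp only [ggD, gsD, List.getD_eq_getElem?_getD, List.getElem?_modify]
  rcases h with h | h
  · cases g[i]? <;> simp [show ¬ p = i from fun hh => h hh.symm]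
  · cases hg : g[i]? with
    | none => by_cases hp : p = i <;> simp [hp]
    | some r =>
      by_cases hp : p = i <;>
        simp [hp, List.getElem?_set, show ¬ j = q from h, show ¬ q = j from fun hh => h hh.symm]

lemma gg_gs_self {α : Type} (g : List (List α)) (p q : Nat) (v d : α)
    (hp : p < g.length) (hq : q < (g.getD p []).length) :
    ggD (gsD g p q v) p q d = v := by
  have hq' : q < (g[p]'hp).length := by
    rwa [List.getD_eq_getElem?_getD, List.getElem?_eq_getElem hp] at hq
  simp only [ggD, gsD, List.getD_eq_getElem?_getD, List.getElem?_modify,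
    List.getElem?_eq_getElem hp, Option.map_some, Option.getD_some]
  simp [List.getElem?_set, hq']

-- pyRange with the bounds the ports use, natified
lemma pyR0 (k : Int) : PySem.List.pyRange 0 k 1 = (List.range k.toNat).map (fun (t : Nat) => (t : Int)) := by
  rw [PySem.List.pyRange_of_pos 0 k (by norm_num)]
  have : ((k - 0 + 1 - 1) / 1).toNat = k.toNat := by omega
  rw [this]
  by_cases h : (0:Int) < k
  · rw [if_pos h]
    apply List.map_congr_left
    intro t _; ring
  · rw [if_neg h, show k.toNat = 0 by omega]
    simp

lemma pyRdown (i : Nat) :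
    PySem.List.pyRange (i : Int) 0 (-1) = (List.range i).map (fun (t : Nat) => ((i : Int) - (t : Int))) := by
  rw [PySem.List.pyRange_of_neg _ _ (by norm_num)]
  by_cases h : 0 < i
  · have h2 : (0:Int) < (i:Int) := by exact_mod_cast h
    have h3 : (((i:Int) - 0 + - -1 - 1) / - -1).toNat = i := by
      norm_num
    rw [if_pos h2, h3]
    apply List.map_congr_left
    intro t _; ring
  · have hi : i = 0 := by omega
    subst hi; simp

-- the ports' Int-side accessors coincide with the Nat-side ones
lemma pvGet2_nat {α : Type} (g : List (List α)) (i j : Nat) (d : α) :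
    pvGet2 g (i : Int) (j : Int) d = ggD g i j d := by
  simp [pvGet2, ggD, PySem.List.pyGetD_natCast]

lemma pvSet2_nat {α : Type} (g : List (List α)) (i j : Nat) (v : α) :
    pvSet2 g (i : Int) (j : Int) v = gsD g i j v := by
  simp [pvSet2, gsD]


-- === crush-grid characterization ===

def set4 (a : List (List Bool)) (p q : Nat) : List (List Bool) :=
  gsD (gsD (gsD (gsD a p q true) p (q+1) true) (p+1) q true) (p+1) (q+1) true

def mark4F (g : List (List Char)) : List (List Bool) → Nat × Nat → List (List Bool) :=
  fun a pq => if monoB g pq.1 pq.2 then set4 a pq.1 pq.2 else a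

def ShapeB (M N : Nat) (a : List (List Bool)) : Prop :=
  a.length = M ∧ ∀ i, (a.getD i []).length = (if i < M then N else 0)

lemma shapeB_gs {M N : Nat} {a : List (List Bool)} (hS : ShapeB M N a) (p q : Nat) (v : Bool) :
    ShapeB M N (gsD a p q v) := by
  exact ⟨by rw [gs_length, hS.1], fun i => by rw [gs_row_length]; exact hS.2 i⟩

lemma shapeB_set4 {M N : Nat} {a : List (List Bool)} (hS : ShapeB M N a) (p q : Nat) :
    ShapeB M N (set4 a p q) :=
  shapeB_gs (shapeB_gs (shapeB_gs (shapeB_gs hS p q true) p (q+1) true) (p+1) q true) (p+1) (q+1) true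

lemma gg_set4 {M N : Nat} {a : List (List Bool)} (hS : ShapeB M N a) {p q : Nat}
    (hp : p + 1 < M) (hq : q + 1 < N) (i j : Nat) :
    ggD (set4 a p q) i j false
      = (((i == p || i == p+1) && (j == q || j == q+1)) || ggD a i j false) := by
  have hrow : ∀ (b : List (List Bool)), ShapeB M N b → ∀ r, r < M → r < b.length ∧
      ∀ c, c < N → c < (b.getD r []).length := by
    intro b hb r hr
    refine ⟨by rw [hb.1]; exact hr, fun c hc => by rw [hb.2 r, if_pos hr]; exact hc⟩
  have h1 := shapeB_gs hS p q true
  have h2 := shapeB_gs h1 p (q+1) true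
  have h3 := shapeB_gs h2 (p+1) q true
  by_cases hip : i = p ∨ i = p + 1
  · by_cases hjq : j = q ∨ j = q + 1
    · have hmem : ((i == p || i == p+1) && (j == q || j == q+1)) = true := by
        rcases hip with h | h <;> rcases hjq with h' | h' <;> simp [h, h']
      rw [hmem, Bool.true_or]
      unfold set4
      rcases hip with hi' | hi' <;> rcases hjq with hj' | hj' <;> rw [hi', hj']
      · rw [gg_gs_ne _ _ _ _ _ _ _ (Or.inl (by omega)),
            gg_gs_ne _ _ _ _ _ _ _ (Or.inl (by omega)),
            gg_gs_ne _ _ _ _ _ _ _ (Or.inr (by omega))]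
        exact gg_gs_self _ _ _ _ _ ((hrow a hS p (by omega)).1) ((hrow a hS p (by omega)).2 q (by omega))
      · rw [gg_gs_ne _ _ _ _ _ _ _ (Or.inl (by omega)),
            gg_gs_ne _ _ _ _ _ _ _ (Or.inl (by omega))]
        exact gg_gs_self _ _ _ _ _ ((hrow _ h1 p (by omega)).1) ((hrow _ h1 p (by omega)).2 (q+1) (by omega))
      · rw [gg_gs_ne _ _ _ _ _ _ _ (Or.inr (by omega))]
        exact gg_gs_self _ _ _ _ _ ((hrow _ h2 (p+1) (by omega)).1) ((hrow _ h2 (p+1) (by omega)).2 q (by omega))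
      · exact gg_gs_self _ _ _ _ _ ((hrow _ h3 (p+1) (by omega)).1) ((hrow _ h3 (p+1) (by omega)).2 (q+1) (by omega))
    · have hmem : ((i == p || i == p+1) && (j == q || j == q+1)) = false := by
        have h1' : (j == q) = false := by simp; omega
        have h2' : (j == q+1) = false := by simp; omega
        simp [h1', h2']
      rw [hmem, Bool.false_or]
      unfold set4
      rw [gg_gs_ne _ _ _ _ _ _ _ (Or.inr (by omega)), gg_gs_ne _ _ _ _ _ _ _ (Or.inr (by omega)),
          gg_gs_ne _ _ _ _ _ _ _ (Or.inr (by omega)), gg_gs_ne _ _ _ _ _ _ _ (Or.inr (by omega))]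
  · have hmem : ((i == p || i == p+1) && (j == q || j == q+1)) = false := by
      have h1' : (i == p) = false := by simp; omega
      have h2' : (i == p+1) = false := by simp; omega
      simp [h1', h2']
    rw [hmem, Bool.false_or]
    unfold set4
    rw [gg_gs_ne _ _ _ _ _ _ _ (Or.inl (by omega)), gg_gs_ne _ _ _ _ _ _ _ (Or.inl (by omega)),
        gg_gs_ne _ _ _ _ _ _ _ (Or.inl (by omega)), gg_gs_ne _ _ _ _ _ _ _ (Or.inl (by omega))]

lemma shapeB_fold {M N : Nat} (g : List (List Char)) (P : List (Nat × Nat))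
    {a : List (List Bool)} (hS : ShapeB M N a) :
    ShapeB M N (P.foldl (mark4F g) a) := by
  induction P generalizing a with
  | nil => exact hS
  | cons pq P ih =>
    simp only [List.foldl_cons]
    apply ih
    unfold mark4F
    split
    · exact shapeB_set4 hS _ _
    · exact hS

lemma gg_foldl_mark {M N : Nat} (g : List (List Char)) (P : List (Nat × Nat))
    {a : List (List Bool)} (hS : ShapeB M N a)
    (hP : ∀ pq ∈ P, pq.1 + 1 < M ∧ pq.2 + 1 < N) (i j : Nat) :
    ggD (P.foldl (mark4F g) a) i j false
      = (ggD a i j false ||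
          P.any fun pq => monoB g pq.1 pq.2 && ((i == pq.1 || i == pq.1+1) && (j == pq.2 || j == pq.2+1))) := by
  induction P generalizing a with
  | nil => simp
  | cons pq P ih =>
    simp only [List.foldl_cons, List.any_cons]
    have hpq := hP pq (List.mem_cons_self)
    have hstep : ShapeB M N (mark4F g a pq) := by
      unfold mark4F; split
      · exact shapeB_set4 hS _ _
      · exact hS
    rw [ih hstep (fun x hx => hP x (List.mem_cons_of_mem _ hx))]
    unfold mark4F
    by_cases hmono : monoB g pq.1 pq.2
    · rw [if_pos hmono, gg_set4 hS hpq.1 hpq.2, hmono]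
      cases ggD a i j false <;> cases (i == pq.1 || i == pq.1+1) && (j == pq.2 || j == pq.2+1) <;> simp
    · rw [if_neg hmono]
      have : monoB g pq.1 pq.2 = false := by exact Bool.not_eq_true _ ▸ (by simpa using hmono)
      simp [this]

lemma foldl_nest {α β γ : Type} (os : List α) (is : List β) (f : γ → α → β → γ) (init : γ) :
    os.foldl (fun acc a => is.foldl (fun acc b => f acc a b) acc) init
      = (os.flatMap fun a => is.map fun b => (a, b)).foldl (fun acc pq => f acc pq.1 pq.2) init := by
  induction os generalizing init with
  | nil => rfl
  | cons o os ih =>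
    simp only [List.foldl_cons, List.flatMap_cons, List.foldl_append, List.foldl_map]
    exact ih _

lemma getD_lt {α : Type} (a : List α) (d : α) {i : Nat} (h : i < a.length) :
    a.getD i d = a[i] := by
  rw [List.getD_eq_getElem?_getD, List.getElem?_eq_getElem h]; rfl

lemma ggD_eq_getElem {α : Type} (a : List (List α)) {i j : Nat} (d : α) (h1 : i < a.length)
    (h2 : j < (a[i]'h1).length) : ggD a i j d = (a[i]'h1)[j]'h2 := by
  unfold ggD
  rw [getD_lt a [] h1, getD_lt _ d h2]

lemma stepA_eq (g : List (List Char)) (p q : Nat) (ci : List (List Bool)) :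
    (if pvGet2 g (↑p) (↑q) ' ' = ' ' then ci
     else
       if pvGet2 g (↑p) (↑q) ' ' = pvGet2 g (↑p) (↑q + 1) ' ' ∧
           pvGet2 g (↑p) (↑q) ' ' = pvGet2 g (↑p + 1) (↑q) ' ' ∧
           pvGet2 g (↑p) (↑q) ' ' = pvGet2 g (↑p + 1) (↑q + 1) ' ' then
         pvSet2 (pvSet2 (pvSet2 (pvSet2 ci (↑p) (↑q) true) (↑p) (↑q + 1) true) (↑p + 1) (↑q) true)
           (↑p + 1) (↑q + 1) true
       else ci)
    = mark4F g ci (p, q) := by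
  have e1 : ((p : Int) + 1) = ((p + 1 : Nat) : Int) := by push_cast; ring
  have e2 : ((q : Int) + 1) = ((q + 1 : Nat) : Int) := by push_cast; ring
  rw [e1, e2]
  simp only [pvGet2_nat, pvSet2_nat]
  by_cases h0 : ggD g p q ' ' = ' '
  · rw [if_pos h0]
    have hm : monoB g p q = false := by simp [monoB, h0]
    simp [mark4F, hm]
  · rw [if_neg h0]
    by_cases hc : ggD g p q ' ' = ggD g p (q+1) ' ' ∧ ggD g p q ' ' = ggD g (p+1) q ' ' ∧
        ggD g p q ' ' = ggD g (p+1) (q+1) ' '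
    · rw [if_pos hc]
      obtain ⟨c1, c2, c3⟩ := hc
      have hm : monoB g p q = true := by simp [monoB, h0, c1.symm, c2.symm, c3.symm]
      simp [mark4F, hm, set4]
    · rw [if_neg hc]
      have hm : monoB g p q = false := by
        cases e1' : (ggD g p (q+1) ' ' == ggD g p q ' ') <;>
        cases e2' : (ggD g (p+1) q ' ' == ggD g p q ' ') <;>
        cases e3' : (ggD g (p+1) (q+1) ' ' == ggD g p q ' ') <;>
          simp [monoB, e1', e2', e3']
        exact absurd ⟨(eq_of_beq e1').symm, (eq_of_beq e2').symm, (eq_of_beq e3').symm⟩ hc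
      simp [mark4F, hm]

lemma crush_eq (m n : Int) (g : List (List Char)) :
    pvCrushA m n g = ccG m.toNat n.toNat g := by
  have hM1 : (m-1).toNat = m.toNat - 1 := by omega
  have hN1 : (n-1).toNat = n.toNat - 1 := by omega
  unfold pvCrushA
  rw [pyR0 (m-1), pyR0 (n-1), pyR0 m, pyR0 n, hM1, hN1]
  simp only [List.foldl_map]
  refine Eq.trans (PySem.List.foldl_congr_mem _ _
    (fun ci p => (List.range (n.toNat - 1)).foldl (fun ci q => mark4F g ci (p, q)) ci) _
    (fun acc p _ => PySem.List.foldl_congr_mem _ _ _ _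
      (fun acc' q _ => stepA_eq g p q acc'))) ?_
  rw [foldl_nest]
  have hinit : (List.map (fun _ => List.map (fun _ => false) (List.map (fun (t : Nat) => (t : Int)) (List.range n.toNat)))
      (List.map (fun (t : Nat) => (t : Int)) (List.range m.toNat)))
      = (List.range m.toNat).map (fun _ => (List.range n.toNat).map (fun _ => false)) := by
    simp only [List.map_map]
    rfl
  rw [hinit]
  set M := m.toNat with hM
  set N := n.toNat with hN
  set PL := (List.range (M - 1)).flatMap (fun p => (List.range (N - 1)).map fun q => (p, q)) with hPL
  have hstep : (fun (acc : List (List Bool)) (pq : Nat × Nat) => mark4F g acc (pq.1, pq.2)) = mark4F g := by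
    funext acc pq; rfl
  rw [hstep]
  have hS0 : ShapeB M N ((List.range M).map (fun _ => (List.range N).map (fun _ => false))) := by
    constructor
    · simp
    · intro i
      rw [List.getD_eq_getElem?_getD, List.getElem?_map]
      by_cases hi : i < M
      · rw [List.getElem?_eq_getElem (by simpa using hi)]
        simp [hi]
      · rw [List.getElem?_eq_none (by simpa using Nat.le_of_not_lt hi)]
        simp [hi]
  have hP : ∀ pq ∈ PL, pq.1 + 1 < M ∧ pq.2 + 1 < N := by
    intro pq hpq
    rw [hPL, List.mem_flatMap] at hpq
    obtain ⟨p, hp, hq⟩ := hpq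
    rw [List.mem_map] at hq
    obtain ⟨q, hq, rfl⟩ := hq
    rw [List.mem_range] at hp hq
    exact ⟨by omega, by omega⟩
  have hSF := shapeB_fold (M := M) (N := N) g PL hS0
  apply List.ext_getElem
  · rw [hSF.1]; simp [ccG]
  · intro i h1 h2
    have hiM : i < M := by rw [← hSF.1]; exact h1
    apply List.ext_getElem
    · have := hSF.2 i
      rw [List.getD_eq_getElem?_getD, List.getElem?_eq_getElem h1] at this
      simp only [Option.getD_some] at this
      rw [this, if_pos hiM]
      simp [ccG, hiM]
    · intro j hj1 hj2
      have hrowlen : ((PL.foldl (mark4F g) ((List.range M).map (fun _ => (List.range N).map (fun _ => false))))[i]'h1).length = N := by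
        have := hSF.2 i
        rw [getD_lt _ [] h1] at this
        rw [this, if_pos hiM]
      rw [← ggD_eq_getElem _ false h1 hj1, gg_foldl_mark g PL hS0 hP i j]
      have hjN : j < N := by rw [hrowlen] at hj1; exact hj1
      have hgg0 : ggD ((List.range M).map (fun _ => (List.range N).map (fun _ => false))) i j false = false := by
        unfold ggD
        rw [getD_lt _ [] (by simpa using hiM)]
        simp only [List.getElem_map]
        by_cases hj : j < N
        · rw [getD_lt _ false (by simpa using hj)]; simp
        · rw [List.getD_eq_getElem?_getD, List.getElem?_eq_none (by simpa using Nat.le_of_not_lt hj)]; rfl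
      rw [hgg0, Bool.false_or, hPL, List.any_flatMap]
      have hswap : ∀ p : Nat, ((List.range (N-1)).map fun q => (p, q)).any
            (fun pq => monoB g pq.1 pq.2 && ((i == pq.1 || i == pq.1+1) && (j == pq.2 || j == pq.2+1)))
          = (List.range (N-1)).any (fun q => monoB g p q && (i == p || i == p+1) && (j == q || j == q+1)) := by
        intro p
        rw [List.any_map]
        apply PySem.List.any_congr_mem
        intro q _
        simp [Bool.and_assoc]
      simp only [hswap]
      have hcc : (ccG M N g)[i]'h2 = (List.range N).map (fun j => mkB M N g i j) := by
        simp [ccG]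
      rw [List.getElem_of_eq hcc (by rw [hcc]; simpa using hjN)]
      simp only [List.getElem_map, List.getElem_range]
      rfl


-- === count characterization ===

lemma ccG_getD (M N : Nat) (g : List (List Char)) {i : Nat} (hi : i < M) :
    (ccG M N g).getD i [] = (List.range N).map (fun j => mkB M N g i j) := by
  unfold ccG
  rw [getD_lt _ [] (by simpa using hi)]
  simp

lemma rowcount (M N : Nat) (g : List (List Char)) {i : Nat} (hi : i < M) :
    PySem.List.count ((ccG M N g).getD i []) true
      = (List.range N).countP (fun j => mkB M N g i j) := by
  rw [ccG_getD M N g hi]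
  simp only [PySem.List.count, List.count_eq_countP, List.countP_map]
  apply List.countP_congr
  intro j _
  simp

lemma countA_prefix (m : Int) (ci : List (List Bool)) (L : List Nat) (t0 : Int)
    (h : ∀ k ∈ L, ((k : Nat) : Int) ≠ m - 1) :
    (L.map (fun (t : Nat) => (t : Int))).foldl
      (fun acc i =>
        let t := acc.1 + (PySem.List.count (PySem.List.pyGetD ci i []) true : Int)
        (t, acc.2 || (t == 0 && i == m - 1))) (t0, false)
      = (t0 + ((L.map (fun k => (PySem.List.count (ci.getD k []) true : Int))).sum), false) := by
  induction L generalizing t0 with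
  | nil => simp
  | cons k L ih =>
    simp only [List.map_cons, List.foldl_cons, List.sum_cons]
    have hk : ((k : Int) == m - 1) = false := by
      simp only [beq_eq_false_iff_ne, ne_eq]
      exact h k List.mem_cons_self
    rw [PySem.List.pyGetD_natCast]
    simp only [hk, Bool.and_false, Bool.or_false]
    rw [ih _ (fun k' hk' => h k' (List.mem_cons_of_mem _ hk'))]
    rw [add_assoc]

lemma countA_eq (m : Int) (hm : 1 ≤ m) (ci : List (List Bool)) :
    pvCountA m ci
      = (((List.range m.toNat).map (fun k => (PySem.List.count (ci.getD k []) true : Int))).sum,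
         ((List.range m.toNat).map (fun k => (PySem.List.count (ci.getD k []) true : Int))).sum == 0) := by
  have hM : m.toNat = (m.toNat - 1) + 1 := by omega
  unfold pvCountA
  rw [pyR0, hM, List.range_succ, List.map_append, List.foldl_append]
  rw [countA_prefix m ci _ 0 (fun k hk => by
    rw [List.mem_range] at hk
    have : (k : Int) < ((m.toNat - 1 : Nat) : Int) := by exact_mod_cast hk
    omega)]
  simp only [List.map_cons, List.map_nil, List.foldl_cons, List.foldl_nil]
  rw [PySem.List.pyGetD_natCast]
  have hlast : (((m.toNat - 1 : Nat) : Int) == m - 1) = true := by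
    simp only [beq_iff_eq]
    omega
  rw [hlast]
  simp only [Bool.and_true, Bool.false_or, zero_add]
  rw [List.map_append, List.sum_append]
  simp

-- === mark-set characterization ===

lemma mem_fold_update {α β : Type} [BEq α] [LawfulBEq α] (P : List β) (c : β → Bool)
    (corn : β → List α) (s0 : PySem.Set α) (y : α) :
    (y ∈ P.foldl (fun s x => if c x then PySem.Set.update s (corn x) else s) s0)
      ↔ (y ∈ s0 ∨ ∃ x ∈ P, c x = true ∧ y ∈ corn x) := by
  induction P generalizing s0 with
  | nil => simp
  | cons x P ih =>
    simp only [List.foldl_cons]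
    by_cases hc : c x
    · rw [if_pos hc, ih]
      rw [PySem.Set.mem_update]
      constructor
      · rintro ((h | h) | ⟨x', hx', hc', hy⟩)
        · exact Or.inl h
        · exact Or.inr ⟨x, List.mem_cons_self, hc, h⟩
        · exact Or.inr ⟨x', List.mem_cons_of_mem _ hx', hc', hy⟩
      · rintro (h | ⟨x', hx', hc', hy⟩)
        · exact Or.inl (Or.inl h)
        · rcases List.mem_cons.mp hx' with rfl | hx'
          · exact Or.inl (Or.inr hy)
          · exact Or.inr ⟨x', hx', hc', hy⟩
    · rw [if_neg hc, ih]
      constructor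
      · rintro (h | ⟨x', hx', hc', hy⟩)
        · exact Or.inl h
        · exact Or.inr ⟨x', List.mem_cons_of_mem _ hx', hc', hy⟩
      · rintro (h | ⟨x', hx', hc', hy⟩)
        · exact Or.inl h
        · rcases List.mem_cons.mp hx' with rfl | hx'
          · exact absurd hc' (by simpa using hc)
          · exact Or.inr ⟨x', hx', hc', hy⟩

lemma nodup_fold_update {α β : Type} [BEq α] [LawfulBEq α] (P : List β) (c : β → Bool)
    (corn : β → List α) (s0 : PySem.Set α) (h0 : s0.Nodup) :
    (P.foldl (fun s x => if c x then PySem.Set.update s (corn x) else s) s0).Nodup := by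
  induction P generalizing s0 with
  | nil => exact h0
  | cons x P ih =>
    simp only [List.foldl_cons]
    apply ih
    split
    · exact PySem.Set.nodup_update _ _ h0
    · exact h0

lemma gg_tG (M N : Nat) (g : List (List Char)) {i j : Nat} (hi : i < M) (hj : j < N) :
    ggD (tG M N g) j i ' ' = ggD g i j ' ' := by
  unfold tG ggD
  rw [getD_lt _ [] (by simpa using hj)]
  simp only [List.getElem_map, List.getElem_range]
  rw [getD_lt _ ' ' (by simpa using hi)]
  simp

lemma stepB_eq (M N : Nat) (g : List (List Char)) (s : PySem.Set (Int × Int)) {p q : Nat}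
    (hp : p < M - 1) (hq : q < N - 1) :
    (let c := pvGet2 (tG M N g) (q : Int) (p : Int) ' '
     if c ≠ ' ' ∧ pvGet2 (tG M N g) ((q : Int) + 1) (p : Int) ' ' = c ∧
         pvGet2 (tG M N g) (q : Int) ((p : Int) + 1) ' ' = c ∧
         pvGet2 (tG M N g) ((q : Int) + 1) ((p : Int) + 1) ' ' = c then
       PySem.Set.update s [((p : Int), (q : Int)), ((p : Int), (q : Int) + 1),
         ((p : Int) + 1, (q : Int)), ((p : Int) + 1, (q : Int) + 1)]
     else s)
    = (if monoB g p q then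
        PySem.Set.update s [((p : Int), (q : Int)), ((p : Int), (q : Int) + 1),
          ((p : Int) + 1, (q : Int)), ((p : Int) + 1, (q : Int) + 1)]
       else s) := by
  have e1 : ((p : Int) + 1) = ((p + 1 : Nat) : Int) := by push_cast; ring
  have e2 : ((q : Int) + 1) = ((q + 1 : Nat) : Int) := by push_cast; ring
  have hg00 : pvGet2 (tG M N g) (q : Int) (p : Int) ' ' = ggD g p q ' ' := by
    rw [pvGet2_nat]; exact gg_tG M N g (by omega) (by omega)
  have hg01 : pvGet2 (tG M N g) ((q : Int) + 1) (p : Int) ' ' = ggD g p (q+1) ' ' := by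
    rw [e2, pvGet2_nat]; exact gg_tG M N g (by omega) (by omega)
  have hg10 : pvGet2 (tG M N g) (q : Int) ((p : Int) + 1) ' ' = ggD g (p+1) q ' ' := by
    rw [e1, pvGet2_nat]; exact gg_tG M N g (by omega) (by omega)
  have hg11 : pvGet2 (tG M N g) ((q : Int) + 1) ((p : Int) + 1) ' ' = ggD g (p+1) (q+1) ' ' := by
    rw [e1, e2, pvGet2_nat]; exact gg_tG M N g (by omega) (by omega)
  show (if _ ∧ _ then _ else s) = _
  rw [hg00, hg01, hg10, hg11]
  refine if_congr ?_ rfl rfl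
  unfold monoB
  constructor
  · rintro ⟨h0, h1, h2, h3⟩
    simp [h0, h1, h2, h3]
  · intro h
    simp only [Bool.and_eq_true, bne_iff_ne, ne_eq, beq_iff_eq] at h
    exact ⟨h.1.1.1, h.1.1.2, h.1.2, h.2⟩

def cornersI (p q : Nat) : List (Int × Int) :=
  [((p : Int), (q : Int)), ((p : Int), (q : Int) + 1),
   ((p : Int) + 1, (q : Int)), ((p : Int) + 1, (q : Int) + 1)]

lemma marks_canon (m n : Int) (g : List (List Char)) :
    pvMarksB m n (tG m.toNat n.toNat g)
      = ((List.range (n.toNat - 1)).flatMap (fun q => (List.range (m.toNat - 1)).map fun p => (q, p))).foldl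
          (fun s pq => if monoB g pq.2 pq.1 then PySem.Set.update s (cornersI pq.2 pq.1) else s)
          PySem.Set.empty := by
  have hM1 : (m-1).toNat = m.toNat - 1 := by omega
  have hN1 : (n-1).toNat = n.toNat - 1 := by omega
  unfold pvMarksB
  rw [pyR0 (n-1), pyR0 (m-1), hM1, hN1]
  simp only [List.foldl_map]
  rw [Eq.trans (PySem.List.foldl_congr_mem _ _
    (fun s q => (List.range (m.toNat - 1)).foldl
      (fun s p => if monoB g p q then PySem.Set.update s (cornersI p q) else s) s) _
    (fun acc q hq => PySem.List.foldl_congr_mem _ _ _ _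
      (fun acc' p hp => stepB_eq m.toNat n.toNat g acc'
        (List.mem_range.mp hp) (List.mem_range.mp hq)))) rfl]
  rw [foldl_nest]

lemma marks_mem (m n : Int) (g : List (List Char)) (y : Int × Int) :
    y ∈ pvMarksB m n (tG m.toNat n.toNat g)
      ↔ ∃ p q : Nat, p < m.toNat - 1 ∧ q < n.toNat - 1 ∧ monoB g p q = true ∧ y ∈ cornersI p q := by
  rw [marks_canon]
  rw [mem_fold_update _ (fun pq : Nat × Nat => monoB g pq.2 pq.1) (fun pq => cornersI pq.2 pq.1)]
  constructor
  · rintro (h | ⟨⟨q, p⟩, hmem, hc, hy⟩)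
    · simp [PySem.Set.empty] at h
    · rw [List.mem_flatMap] at hmem
      obtain ⟨q', hq', hmem⟩ := hmem
      rw [List.mem_map] at hmem
      obtain ⟨p', hp', he⟩ := hmem
      cases he
      exact ⟨p, q, List.mem_range.mp hp', List.mem_range.mp hq', hc, hy⟩
  · rintro ⟨p, q, hp, hq, hc, hy⟩
    refine Or.inr ⟨(q, p), ?_, hc, hy⟩
    rw [List.mem_flatMap]
    exact ⟨q, List.mem_range.mpr hq, List.mem_map.mpr ⟨p, List.mem_range.mpr hp, rfl⟩⟩

lemma marks_nodup (m n : Int) (g : List (List Char)) :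
    (pvMarksB m n (tG m.toNat n.toNat g)).Nodup := by
  rw [marks_canon]
  exact nodup_fold_update _ _ _ _ (by simp [PySem.Set.empty])


-- === gravity characterization ===

lemma cnt_le (M N : Nat) (g : List (List Char)) (i j : Nat) : cntPre M N g i j ≤ i := by
  simpa [cntPre] using
    List.countP_le_length (p := fun i' => mkB M N g i' j) (l := List.range i)

lemma cnt_succ (M N : Nat) (g : List (List Char)) (i j : Nat) :
    cntPre M N g (i+1) j = cntPre M N g i j + (if mkB M N g i j then 1 else 0) := by
  unfold cntPre
  rw [List.range_succ, List.countP_append]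
  simp [List.countP_cons]

lemma kept_succ (M N : Nat) (g : List (List Char)) (i j : Nat) :
    keptPre M N g (i+1) j
      = keptPre M N g i j ++ (if mkB M N g i j then [] else [ggD g i j ' ']) := by
  unfold keptPre
  rw [List.range_succ, List.filter_append, List.map_append]
  congr 1
  by_cases h : mkB M N g i j <;> simp [h]

lemma kept_len (M N : Nat) (g : List (List Char)) (i j : Nat) :
    (keptPre M N g i j).length = i - cntPre M N g i j := by
  induction i with
  | zero => simp [keptPre, cntPre]
  | succ i ih =>
    rw [kept_succ, cnt_succ, List.length_append, ih]
    have := cnt_le M N g i j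
    by_cases h : mkB M N g i j <;> simp [h] <;> omega

def SF (j : Nat) : Nat → List (List Char) → List (List Char)
  | 0, b => b
  | k+1, b => SF j k (gsD b (k+1) j (ggD b k j ' '))

lemma SF_len (j i : Nat) (b : List (List Char)) :
    (SF j i b).length = b.length ∧ ∀ r, ((SF j i b).getD r []).length = (b.getD r []).length := by
  induction i generalizing b with
  | zero => exact ⟨rfl, fun _ => rfl⟩
  | succ i ih =>
    refine ⟨?_, fun r => ?_⟩
    · rw [show SF j (i+1) b = SF j i (gsD b (i+1) j (ggD b i j ' ')) from rfl, (ih _).1, gs_length]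
    · rw [show SF j (i+1) b = SF j i (gsD b (i+1) j (ggD b i j ' ')) from rfl, (ih _).2, gs_row_length]

lemma SF_gg_other (j i : Nat) (b : List (List Char)) (i' j' : Nat) (d : Char) (h : j' ≠ j) :
    ggD (SF j i b) i' j' d = ggD b i' j' d := by
  induction i generalizing b with
  | zero => rfl
  | succ i ih =>
    rw [show SF j (i+1) b = SF j i (gsD b (i+1) j (ggD b i j ' ')) from rfl, ih,
      gg_gs_ne _ _ _ _ _ _ _ (Or.inr h)]

lemma SF_gg (j i : Nat) (b : List (List Char)) (hb : i < b.length)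
    (hrow : ∀ r, r ≤ i → j < (b.getD r []).length) (i' : Nat) :
    ggD (SF j i b) i' j ' ' = if 1 ≤ i' ∧ i' ≤ i then ggD b (i'-1) j ' ' else ggD b i' j ' ' := by
  induction i generalizing b with
  | zero =>
    rw [if_neg (by omega)]
    rfl
  | succ i ih =>
    rw [show SF j (i+1) b = SF j i (gsD b (i+1) j (ggD b i j ' ')) from rfl]
    have hb' : i < (gsD b (i+1) j (ggD b i j ' ')).length := by rw [gs_length]; omega
    have hrow' : ∀ r, r ≤ i → j < ((gsD b (i+1) j (ggD b i j ' ')).getD r []).length :=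
      fun r hr => by rw [gs_row_length]; exact hrow r (by omega)
    rw [ih _ hb' hrow']
    by_cases h1 : 1 ≤ i' ∧ i' ≤ i
    · rw [if_pos h1, if_pos ⟨h1.1, by omega⟩, gg_gs_ne _ _ _ _ _ _ _ (Or.inl (by omega))]
    · rw [if_neg h1]
      by_cases h2 : i' = i + 1
      · subst h2
        rw [if_pos ⟨by omega, le_refl _⟩,
          gg_gs_self b (i+1) j (ggD b i j ' ') ' ' hb (hrow (i+1) (le_refl _))]
        norm_num
      · rw [if_neg (by omega), gg_gs_ne _ _ _ _ _ _ _ (Or.inl h2)]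

def OPn (i j : Nat) (b : List (List Char)) : List (List Char) := gsD (SF j i b) 0 j ' '

lemma OPn_len (i j : Nat) (b : List (List Char)) :
    (OPn i j b).length = b.length ∧ ∀ r, ((OPn i j b).getD r []).length = (b.getD r []).length := by
  unfold OPn
  exact ⟨by rw [gs_length, (SF_len j i b).1],
    fun r => by rw [gs_row_length, (SF_len j i b).2]⟩

lemma OPn_gg_other (i j : Nat) (b : List (List Char)) (i' j' : Nat) (d : Char) (h : j' ≠ j) :
    ggD (OPn i j b) i' j' d = ggD b i' j' d := by
  unfold OPn
  rw [gg_gs_ne _ _ _ _ _ _ _ (Or.inr h), SF_gg_other _ _ _ _ _ _ h]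

lemma OPn_gg (i j : Nat) (b : List (List Char)) (hb : i < b.length) (h0 : 0 < b.length)
    (hrow : ∀ r, r ≤ i → j < (b.getD r []).length) (i' : Nat) :
    ggD (OPn i j b) i' j ' '
      = if i' = 0 then ' ' else if i' ≤ i then ggD b (i'-1) j ' ' else ggD b i' j ' ' := by
  unfold OPn
  by_cases hz : i' = 0
  · subst hz
    rw [if_pos rfl]
    exact gg_gs_self _ 0 j ' ' ' ' (by rw [(SF_len j i b).1]; exact h0)
      (by rw [(SF_len j i b).2]; exact hrow 0 (by omega))
  · rw [if_neg hz, gg_gs_ne _ _ _ _ _ _ _ (Or.inl hz), SF_gg j i b hb hrow i']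
    by_cases h1 : i' ≤ i
    · rw [if_pos ⟨by omega, h1⟩, if_pos h1]
    · rw [if_neg (by omega), if_neg h1]

lemma fold_SF (j : Nat) : ∀ (i : Nat) (b : List (List Char)),
    (List.range i).foldl (fun b t => gsD b (i - t) j (ggD b (i - t - 1) j ' ')) b = SF j i b := by
  intro i
  induction i with
  | zero => intro b; rfl
  | succ i ih =>
    intro b
    rw [List.range_succ_eq_map, List.foldl_cons, List.foldl_map]
    have harith : (List.range i).foldl
        (fun b t => gsD b (i + 1 - t.succ) j (ggD b (i + 1 - t.succ - 1) j ' '))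
        (gsD b (i + 1 - 0) j (ggD b (i + 1 - 0 - 1) j ' '))
        = (List.range i).foldl (fun b t => gsD b (i - t) j (ggD b (i - t - 1) j ' '))
          (gsD b (i + 1) j (ggD b i j ' ')) := by
      simp only [Nat.sub_zero, Nat.add_sub_cancel]
      apply PySem.List.foldl_congr_mem
      intro acc t _
      have e2 : i + 1 - t.succ = i - t := by omega
      rw [e2]
    rw [harith, ih]
    rfl

lemma rowOp_port (i j : Nat) (b : List (List Char)) :
    (if (i : Int) = 0 then pvSet2 b (i : Int) (j : Int) ' '
     else
       pvSet2 ((PySem.List.pyRange (i : Int) 0 (-1)).foldl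
         (fun b level => pvSet2 b level (j : Int) (pvGet2 b (level - 1) (j : Int) ' ')) b)
         0 (j : Int) ' ')
    = OPn i j b := by
  by_cases hz : i = 0
  · subst hz
    rw [if_pos (by norm_num), pvSet2_nat]
    rfl
  · rw [if_neg (by exact_mod_cast hz)]
    have hfold : (PySem.List.pyRange (i : Int) 0 (-1)).foldl
        (fun b level => pvSet2 b level (j : Int) (pvGet2 b (level - 1) (j : Int) ' ')) b
        = SF j i b := by
      rw [pyRdown, List.foldl_map]
      refine Eq.trans (PySem.List.foldl_congr_mem _ _
        (fun b t => gsD b (i - t) j (ggD b (i - t - 1) j ' ')) _ ?_) (fold_SF j i b)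
      intro acc t ht
      rw [List.mem_range] at ht
      have e1 : ((i : Int) - (t : Int)) = ((i - t : Nat) : Int) := by omega
      have e2 : ((i : Int) - (t : Int) - 1) = ((i - t - 1 : Nat) : Int) := by omega
      rw [e2, e1, pvSet2_nat, pvGet2_nat]
    rw [hfold]
    have : (0 : Int) = ((0 : Nat) : Int) := by norm_num
    rw [this, pvSet2_nat]
    rfl

lemma inner_fold (M N : Nat) (g : List (List Char)) (hS : ShapeG M N g) (i : Nat) (hi : i < M) :
    ∀ (L : List Nat), L.Nodup → (∀ j ∈ L, j < N) → ∀ (b : List (List Char)),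
      b.length = g.length → (∀ r, (b.getD r []).length = (g.getD r []).length) →
      ( (L.foldl (fun b j => if mkB M N g i j = true then OPn i j b else b) b).length = b.length
      ∧ (∀ r, ((L.foldl (fun b j => if mkB M N g i j = true then OPn i j b else b) b).getD r []).length
            = (b.getD r []).length)
      ∧ ∀ i' j', ggD (L.foldl (fun b j => if mkB M N g i j = true then OPn i j b else b) b) i' j' ' '
          = if j' ∈ L ∧ mkB M N g i j' = true
            then (if i' = 0 then ' ' else if i' ≤ i then ggD b (i'-1) j' ' ' else ggD b i' j' ' ')
            else ggD b i' j' ' ' ) := by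
  intro L
  induction L with
  | nil =>
    intro _ _ b _ _
    exact ⟨rfl, fun _ => rfl, fun i' j' => by simp⟩
  | cons j0 T ih =>
    intro hnd hL b hlen hrows
    have hj0N : j0 < N := hL j0 List.mem_cons_self
    have hOP : ∀ (jx : Nat), jx < N →
        i < b.length ∧ 0 < b.length ∧ ∀ r, r ≤ i → jx < (b.getD r []).length := by
      intro jx hjx
      have hSM := hS.1
      refine ⟨by rw [hlen]; omega, by rw [hlen]; omega, fun r hr => ?_⟩
      rw [hrows r]
      exact lt_of_lt_of_le hjx (hS.2 r (by omega))
    set b1 := if mkB M N g i j0 = true then OPn i j0 b else b with hb1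
    have hlen1 : b1.length = b.length := by
      rw [hb1]; split
      · exact (OPn_len i j0 b).1
      · rfl
    have hrows1 : ∀ r, (b1.getD r []).length = (b.getD r []).length := by
      intro r; rw [hb1]; split
      · exact (OPn_len i j0 b).2 r
      · rfl
    have hgg1_other : ∀ i' j', j' ≠ j0 → ggD b1 i' j' ' ' = ggD b i' j' ' ' := by
      intro i' j' hne
      rw [hb1]; split
      · exact OPn_gg_other i j0 b i' j' ' ' hne
      · rfl
    obtain ⟨ihlen, ihrows, ihgg⟩ := ih (List.nodup_cons.mp hnd).2
      (fun j hj => hL j (List.mem_cons_of_mem _ hj)) b1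
      (by rw [hlen1, hlen]) (fun r => by rw [hrows1 r, hrows r])
    have hj0T : j0 ∉ T := (List.nodup_cons.mp hnd).1
    refine ⟨by rw [List.foldl_cons, ← hb1, ihlen, hlen1],
            fun r => by rw [List.foldl_cons, ← hb1, ihrows r, hrows1 r],
            fun i' j' => ?_⟩
    rw [List.foldl_cons, ← hb1, ihgg i' j']
    by_cases hT : j' ∈ T
    · have hne : j' ≠ j0 := fun h => hj0T (h ▸ hT)
      by_cases hmk : mkB M N g i j' = true
      · have hc1 : j' ∈ T ∧ mkB M N g i j' = true := ⟨hT, hmk⟩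
        have hc2 : j' ∈ j0 :: T ∧ mkB M N g i j' = true := ⟨List.mem_cons_of_mem _ hT, hmk⟩
        rw [if_pos hc1, if_pos hc2]
        by_cases hz : i' = 0
        · rw [if_pos hz, if_pos hz]
        · rw [if_neg hz, if_neg hz]
          by_cases h1 : i' ≤ i
          · rw [if_pos h1, if_pos h1, hgg1_other _ _ hne]
          · rw [if_neg h1, if_neg h1, hgg1_other _ _ hne]
      · have hc1 : ¬(j' ∈ T ∧ mkB M N g i j' = true) := fun h => hmk h.2
        have hc2 : ¬(j' ∈ j0 :: T ∧ mkB M N g i j' = true) := fun h => hmk h.2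
        rw [if_neg hc1, if_neg hc2, hgg1_other _ _ hne]
    · by_cases hj0' : j' = j0
      · have hc1 : ¬(j' ∈ T ∧ mkB M N g i j' = true) := fun h => hT h.1
        rw [if_neg hc1]
        by_cases hmk : mkB M N g i j' = true
        · have hc2 : j' ∈ j0 :: T ∧ mkB M N g i j' = true :=
            ⟨by rw [hj0']; exact List.mem_cons_self, hmk⟩
          rw [if_pos hc2, hb1, ← hj0', if_pos hmk]
          obtain ⟨hb', h0', hr'⟩ := hOP j' (hL j' (by rw [hj0']; exact List.mem_cons_self))
          exact OPn_gg i j' b hb' h0' hr' i'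
        · have hc2 : ¬(j' ∈ j0 :: T ∧ mkB M N g i j' = true) := fun h => hmk h.2
          rw [if_neg hc2, hb1, ← hj0', if_neg hmk]
      · have hc1 : ¬(j' ∈ T ∧ mkB M N g i j' = true) := fun h => hT h.1
        have hc2 : ¬(j' ∈ j0 :: T ∧ mkB M N g i j' = true) := fun h =>
          (List.mem_cons.mp h.1).elim (fun he => hj0' he) (fun hm => hT hm)
        rw [if_neg hc1, if_neg hc2, hgg1_other _ _ hj0']


def outerF (M N : Nat) (g : List (List Char)) (K : Nat) : List (List Char) :=
  (List.range K).foldl (fun b i => (List.range N).foldl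
    (fun b j => if mkB M N g i j = true then OPn i j b else b) b) g

lemma grav_canon (m n : Int) (g : List (List Char)) :
    pvGravA m n (ccG m.toNat n.toNat g) g = outerF m.toNat n.toNat g m.toNat := by
  unfold pvGravA outerF
  rw [pyR0 m, pyR0 n]
  simp only [List.foldl_map]
  refine PySem.List.foldl_congr_mem _ _ _ _ ?_
  intro acc i hi
  refine PySem.List.foldl_congr_mem _ _ _ _ ?_
  intro acc' j hj
  rw [List.mem_range] at hi hj
  have hcc : pvGet2 (ccG m.toNat n.toNat g) (i : Int) (j : Int) false
      = mkB m.toNat n.toNat g i j := by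
    rw [pvGet2_nat]
    unfold ggD
    rw [ccG_getD _ _ g hi, getD_lt _ false (by simpa using hj)]
    simp
  rw [hcc]
  by_cases hmk : mkB m.toNat n.toNat g i j = true
  · rw [if_pos hmk, if_pos hmk]
    exact rowOp_port i j acc'
  · rw [if_neg hmk, if_neg hmk]

lemma getD_append_l {α : Type} (l1 l2 : List α) (k : Nat) (d : α) (h : k < l1.length) :
    (l1 ++ l2).getD k d = l1.getD k d := by
  rw [List.getD_eq_getElem?_getD, List.getD_eq_getElem?_getD,
    List.getElem?_append_left h]

lemma getD_append_r {α : Type} (l1 l2 : List α) (k : Nat) (d : α) (h : l1.length ≤ k) :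
    (l1 ++ l2).getD k d = l2.getD (k - l1.length) d := by
  rw [List.getD_eq_getElem?_getD, List.getD_eq_getElem?_getD,
    List.getElem?_append_right h]

lemma colVal_step (M N : Nat) (g : List (List Char)) (K j : Nat) (i' : Nat) :
    (if mkB M N g K j = true
     then (if i' = 0 then ' ' else if i' ≤ K then colVal M N g K j (i'-1) else colVal M N g K j i')
     else colVal M N g K j i') = colVal M N g (K+1) j i' := by
  have hc := cnt_le M N g K j
  have hkl := kept_len M N g K j
  unfold colVal
  rw [cnt_succ, kept_succ]
  by_cases hmk : mkB M N g K j = true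
  · rw [if_pos hmk, hmk]
    simp only [if_true, List.append_nil]
    by_cases hz : i' = 0
    · rw [if_pos hz]
      conv_rhs => rw [if_pos (show i' < cntPre M N g K j + 1 by omega)]
    · rw [if_neg hz]
      by_cases h1 : i' ≤ K
      · rw [if_pos h1]
        by_cases h2 : i' - 1 < cntPre M N g K j
        · conv_lhs => rw [if_pos h2]
          conv_rhs => rw [if_pos (show i' < cntPre M N g K j + 1 by omega)]
        · conv_lhs => rw [if_neg h2, if_pos (show i' - 1 < K by omega)]
          conv_rhs => rw [if_neg (show ¬ i' < cntPre M N g K j + 1 by omega),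
            if_pos (show i' < K + 1 by omega)]
          rw [show i' - (cntPre M N g K j + 1) = i' - 1 - cntPre M N g K j from by omega]
      · rw [if_neg h1]
        conv_lhs => rw [if_neg (show ¬ i' < cntPre M N g K j by omega),
          if_neg (show ¬ i' < K by omega)]
        conv_rhs => rw [if_neg (show ¬ i' < cntPre M N g K j + 1 by omega),
          if_neg (show ¬ i' < K + 1 by omega)]
  · have hmf : mkB M N g K j = false := Bool.eq_false_iff.mpr hmk
    rw [if_neg hmk, hmf]
    simp only [Bool.false_eq_true, if_false, add_zero]
    by_cases h1 : i' < cntPre M N g K j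
    · conv_lhs => rw [if_pos h1]
      conv_rhs => rw [if_pos h1]
    · conv_lhs => rw [if_neg h1]
      conv_rhs => rw [if_neg h1]
      by_cases h2 : i' < K
      · conv_lhs => rw [if_pos h2]
        conv_rhs => rw [if_pos (show i' < K + 1 by omega)]
        rw [getD_append_l _ _ _ _ (by rw [hkl]; omega)]
      · by_cases h3 : i' < K + 1
        · conv_lhs => rw [if_neg h2]
          conv_rhs => rw [if_pos h3]
          rw [getD_append_r _ _ _ _ (by rw [hkl]; omega), hkl,
            show i' - cntPre M N g K j - (K - cntPre M N g K j) = 0 from by omega,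
            show i' = K from by omega]
          rfl
        · conv_lhs => rw [if_neg h2]
          conv_rhs => rw [if_neg h3]

lemma outer_inv (M N : Nat) (g : List (List Char)) (hS : ShapeG M N g) :
    ∀ K, K ≤ M →
      (outerF M N g K).length = g.length
      ∧ (∀ r, ((outerF M N g K).getD r []).length = (g.getD r []).length)
      ∧ ∀ j, j < N → ∀ i', ggD (outerF M N g K) i' j ' ' = colVal M N g K j i' := by
  intro K
  induction K with
  | zero =>
    intro _
    refine ⟨rfl, fun _ => rfl, fun j hj i' => ?_⟩
    unfold outerF colVal cntPre keptPre
    simp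
  | succ K ih =>
    intro hK
    obtain ⟨ihlen, ihrows, ihgg⟩ := ih (by omega)
    have hstep : outerF M N g (K+1) = (List.range N).foldl
        (fun b j => if mkB M N g K j = true then OPn K j b else b) (outerF M N g K) := by
      unfold outerF
      rw [List.range_succ, List.foldl_append, List.foldl_cons, List.foldl_nil]
    obtain ⟨flen, frows, fgg⟩ := inner_fold M N g hS K (by omega) (List.range N)
      (List.nodup_range) (fun j hj => List.mem_range.mp hj) (outerF M N g K)
      (by rw [ihlen]) (fun r => ihrows r)
    refine ⟨by rw [hstep, flen, ihlen], fun r => by rw [hstep, frows r, ihrows r],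
      fun j hj i' => ?_⟩
    rw [hstep, fgg i' j]
    rw [← colVal_step M N g K j i']
    by_cases hmk : mkB M N g K j = true
    · rw [if_pos ⟨List.mem_range.mpr hj, hmk⟩, if_pos hmk]
      by_cases hz : i' = 0
      · rw [if_pos hz, if_pos hz]
      · rw [if_neg hz, if_neg hz]
        by_cases h1 : i' ≤ K
        · rw [if_pos h1, if_pos h1, ihgg j hj]
        · rw [if_neg h1, if_neg h1, ihgg j hj]
    · rw [if_neg (by tauto), if_neg hmk, ihgg j hj]

lemma mkB_iff (M N : Nat) (g : List (List Char)) (i j : Nat) :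
    mkB M N g i j = true
      ↔ ∃ p q : Nat, p < M-1 ∧ q < N-1 ∧ monoB g p q = true
          ∧ (i = p ∨ i = p+1) ∧ (j = q ∨ j = q+1) := by
  unfold mkB
  simp only [List.any_eq_true, List.mem_range, Bool.and_eq_true, Bool.or_eq_true, beq_iff_eq]
  constructor
  · rintro ⟨p, hp, q, hq, ⟨⟨hm, hi⟩, hj⟩⟩
    exact ⟨p, q, hp, hq, hm, hi, hj⟩
  · rintro ⟨p, q, hp, hq, hm, hi, hj⟩
    exact ⟨p, hp, q, hq, ⟨⟨hm, hi⟩, hj⟩⟩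

lemma mem_cornersI (p q i j : Nat) :
    (((i : Int), (j : Int)) ∈ cornersI p q) ↔ ((i = p ∨ i = p+1) ∧ (j = q ∨ j = q+1)) := by
  simp only [cornersI, List.mem_cons, List.mem_singleton, Prod.mk.injEq, List.not_mem_nil,
    or_false]
  omega

lemma contains_marks (m n : Int) (g : List (List Char)) (i j : Nat) :
    PySem.Set.contains (pvMarksB m n (tG m.toNat n.toNat g)) ((i : Int), (j : Int))
      = mkB m.toNat n.toNat g i j := by
  cases h : mkB m.toNat n.toNat g i j with
  | true =>
    obtain ⟨p, q, hp, hq, hmono, hi, hj⟩ := (mkB_iff _ _ g i j).mp h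
    have hmem : ((i : Int), (j : Int)) ∈ pvMarksB m n (tG m.toNat n.toNat g) :=
      (marks_mem m n g _).mpr ⟨p, q, hp, hq, hmono, (mem_cornersI p q i j).mpr ⟨hi, hj⟩⟩
    exact List.contains_iff_mem.mpr hmem
  | false =>
    have hno : ((i : Int), (j : Int)) ∉ pvMarksB m n (tG m.toNat n.toNat g) := by
      intro hmem
      obtain ⟨p, q, hp, hq, hmono, hcor⟩ := (marks_mem m n g _).mp hmem
      obtain ⟨hi, hj⟩ := (mem_cornersI p q i j).mp hcor
      rw [(mkB_iff _ _ g i j).mpr ⟨p, q, hp, hq, hmono, hi, hj⟩] at h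
      exact Bool.true_eq_false.mp h
    exact Bool.eq_false_iff.mpr (fun hc => hno (List.contains_iff_mem.mp hc))

lemma sum_cast (l : List Nat) (f : Nat → Nat) :
    (l.map (fun k => ((f k : Nat) : Int))).sum = (((l.map f).sum : Nat) : Int) := by
  induction l with
  | nil => rfl
  | cons a l ih => simp [ih]

def cpair (i j : Nat) : Int × Int := ((i : Int), (j : Int))

lemma marks_len (m n : Int) (g : List (List Char)) :
    (pvMarksB m n (tG m.toNat n.toNat g)).length = totN m.toNat n.toNat g := by
  set M := m.toNat with hM
  set N := n.toNat with hN
  set LM := (List.range M).flatMap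
    (fun i => ((List.range N).filter (fun j => mkB M N g i j)).map (cpair i)) with hLM
  have hnd : LM.Nodup := by
    rw [hLM, List.nodup_flatMap]
    constructor
    · intro i _
      apply List.Nodup.map
      · intro a b hab
        simp only [cpair, Prod.mk.injEq] at hab
        exact_mod_cast hab.2
      · exact List.Nodup.filter _ List.nodup_range
    · apply List.Pairwise.imp ?_ (List.pairwise_lt_range)
      intro a b hab
      simp only [Function.onFun]
      intro y hy hy'
      rw [List.mem_map] at hy hy'
      obtain ⟨j1, _, he1⟩ := hy
      obtain ⟨j2, _, he2⟩ := hy'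
      rw [← he2] at he1
      simp only [cpair, Prod.mk.injEq] at he1
      have : a = b := by exact_mod_cast he1.1
      omega
  have hmemLM : ∀ y, y ∈ LM ↔ ∃ i j : Nat, i < M ∧ j < N ∧ mkB M N g i j = true
      ∧ y = cpair i j := by
    intro y
    rw [hLM]
    simp only [List.mem_flatMap, List.mem_map, List.mem_filter, List.mem_range]
    constructor
    · rintro ⟨i, hi, j, ⟨hj, hmk⟩, he⟩
      exact ⟨i, j, hi, hj, hmk, he.symm⟩
    · rintro ⟨i, j, hi, hj, hmk, he⟩
      exact ⟨i, hi, j, ⟨hj, hmk⟩, he.symm⟩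
  have hmemM : ∀ y, y ∈ pvMarksB m n (tG M N g) ↔ y ∈ LM := by
    intro y
    rw [hmemLM y, marks_mem m n g y]
    constructor
    · rintro ⟨p, q, hp, hq, hmono, hcor⟩
      simp only [cornersI, List.mem_cons, List.not_mem_nil, or_false] at hcor
      rcases hcor with rfl | rfl | rfl | rfl
      · exact ⟨p, q, by omega, by omega,
          (mkB_iff M N g p q).mpr ⟨p, q, hp, hq, hmono, by omega, by omega⟩, rfl⟩
      · exact ⟨p, q+1, by omega, by omega,
          (mkB_iff M N g p (q+1)).mpr ⟨p, q, hp, hq, hmono, by omega, by omega⟩,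
          by simp [cpair, Prod.ext_iff]; try omega⟩
      · exact ⟨p+1, q, by omega, by omega,
          (mkB_iff M N g (p+1) q).mpr ⟨p, q, hp, hq, hmono, by omega, by omega⟩,
          by simp [cpair, Prod.ext_iff]; try omega⟩
      · exact ⟨p+1, q+1, by omega, by omega,
          (mkB_iff M N g (p+1) (q+1)).mpr ⟨p, q, hp, hq, hmono, by omega, by omega⟩,
          by simp [cpair, Prod.ext_iff]; try omega⟩
    · rintro ⟨i, j, hi, hj, hmk, rfl⟩
      obtain ⟨p, q, hp, hq, hmono, hio, hjo⟩ := (mkB_iff M N g i j).mp hmk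
      exact ⟨p, q, hp, hq, hmono, (mem_cornersI p q i j).mpr ⟨hio, hjo⟩⟩
  have hperm : (pvMarksB m n (tG M N g)).Perm LM :=
    (List.perm_ext_iff_of_nodup (marks_nodup m n g) hnd).mpr hmemM
  rw [hperm.length_eq, hLM, List.length_flatMap]
  unfold totN
  congr 1
  apply List.map_congr_left
  intro i _
  rw [List.length_map, ← List.countP_eq_length_filter]

lemma tG_getD (M N : Nat) (g : List (List Char)) {j : Nat} (hj : j < N) :
    (tG M N g).getD j [] = (List.range M).map (fun i => ggD g i j ' ') := by
  unfold tG
  rw [getD_lt _ [] (by simpa using hj)]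
  simp

lemma compact_eq (m n : Int) (hm : 1 ≤ m) (g : List (List Char)) :
    pvCompactB m n (pvMarksB m n (tG m.toNat n.toNat g)) (tG m.toNat n.toNat g)
      = (List.range n.toNat).map (fun j =>
          List.replicate (cntPre m.toNat n.toNat g m.toNat j) ' '
            ++ keptPre m.toNat n.toNat g m.toNat j) := by
  set M := m.toNat with hM
  set N := n.toNat with hN
  unfold pvCompactB
  rw [pyR0 n, pyR0 m, List.map_map]
  apply List.map_congr_left
  intro j hj
  rw [List.mem_range] at hj
  simp only [Function.comp]
  have hcol : PySem.List.pyGetD (tG M N g) ((j : Nat) : Int) []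
      = (List.range M).map (fun i => ggD g i j ' ') := by
    rw [PySem.List.pyGetD_natCast, tG_getD M N g hj]
  rw [hcol, List.filter_map]
  have hpred : ((fun iI : Int => !(PySem.Set.contains (pvMarksB m n (tG M N g)) (iI, ((j : Nat) : Int))))
        ∘ (fun (t : Nat) => (t : Int)))
      = fun i : Nat => !mkB M N g i j := by
    funext i
    simp only [Function.comp]
    rw [contains_marks]
  rw [hpred, List.map_map]
  have hkept : ((List.range M).filter (fun i => !mkB M N g i j)).map
        ((fun iI : Int => PySem.List.pyGetD ((List.range M).map (fun i => ggD g i j ' ')) iI ' ')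
          ∘ (fun (t : Nat) => (t : Int)))
      = keptPre M N g M j := by
    unfold keptPre
    apply List.map_congr_left
    intro i hi
    have hiM : i < M := List.mem_range.mp (List.mem_filter.mp hi).1
    simp only [Function.comp]
    rw [PySem.List.pyGetD_natCast, getD_lt _ ' ' (by simpa using hiM)]
    simp
  rw [hkept, PySem.List.pyRepeat_singleton]
  congr 1
  rw [kept_len]
  have hcle := cnt_le M N g M j
  congr 1
  have hmM : m = (M : Int) := by omega
  rw [hmM]
  omega

lemma colList_eq (M N : Nat) (g : List (List Char)) (j : Nat) :
    (List.range M).map (fun i' => colVal M N g M j i')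
      = List.replicate (cntPre M N g M j) ' ' ++ keptPre M N g M j := by
  have hcle := cnt_le M N g M j
  have hkl := kept_len M N g M j
  apply List.ext_getElem
  · simp only [List.length_map, List.length_range, List.length_append, List.length_replicate, hkl]
    omega
  · intro k hk1 hk2
    simp only [List.getElem_map, List.getElem_range]
    have hkM : k < M := by simpa using hk1
    unfold colVal
    by_cases h1 : k < cntPre M N g M j
    · rw [if_pos h1, List.getElem_append_left (by simpa using h1)]
      simp
    · rw [if_neg h1, if_pos hkM,
        List.getElem_append_right (by simpa using Nat.le_of_not_lt h1)]
      rw [getD_lt _ ' ' (by rw [hkl]; omega)]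
      congr 1
      simp

lemma grav_shape (m n : Int) (g : List (List Char)) (hS : ShapeG m.toNat n.toNat g) :
    ShapeG m.toNat n.toNat (pvGravA m n (ccG m.toNat n.toNat g) g) := by
  obtain ⟨hlen, hrows, _⟩ := outer_inv m.toNat n.toNat g hS m.toNat (le_refl _)
  rw [grav_canon]
  exact ⟨by rw [hlen]; exact hS.1, fun i hi => by rw [hrows i]; exact hS.2 i hi⟩

lemma grav_compact (m n : Int) (hm : 1 ≤ m) (g : List (List Char)) (hS : ShapeG m.toNat n.toNat g) :
    tG m.toNat n.toNat (pvGravA m n (ccG m.toNat n.toNat g) g)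
      = pvCompactB m n (pvMarksB m n (tG m.toNat n.toNat g)) (tG m.toNat n.toNat g) := by
  rw [compact_eq m n hm g]
  unfold tG
  apply List.map_congr_left
  intro j hj
  rw [List.mem_range] at hj
  rw [← colList_eq]
  apply List.map_congr_left
  intro i' _
  rw [grav_canon]
  exact (outer_inv m.toNat n.toNat g hS m.toNat (le_refl _)).2.2 j hj i'

lemma loop_eq (m n : Int) (hm : 1 ≤ m) :
    ∀ (fuel : Nat) (cnt : Int) (g : List (List Char)), ShapeG m.toNat n.toNat g →
      pvLoopA m n fuel cnt g = pvLoopB m n fuel cnt (tG m.toNat n.toNat g) := by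
  intro fuel
  induction fuel with
  | zero => intro cnt g _; rfl
  | succ fuel ih =>
    intro cnt g hS
    rw [pvLoopA, pvLoopB]
    have hci : pvCrushA m n g = ccG m.toNat n.toNat g := crush_eq m n g
    have hsum : ((List.range m.toNat).map
        (fun k => (PySem.List.count ((ccG m.toNat n.toNat g).getD k []) true : Int))).sum
        = ((totN m.toNat n.toNat g : Nat) : Int) := by
      rw [List.map_congr_left (fun k hk => by
        rw [rowcount m.toNat n.toNat g (List.mem_range.mp hk)])]
      rw [sum_cast]
      rfl
    have hmlen : (pvMarksB m n (tG m.toNat n.toNat g)).length = totN m.toNat n.toNat g :=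
      marks_len m n g
    by_cases htot : totN m.toNat n.toNat g = 0
    · have hA2 : (pvCountA m (pvCrushA m n g)).2 = true := by
        rw [hci, countA_eq m hm, hsum, htot]
        simp
      have hB : pvMarksB m n (tG m.toNat n.toNat g) = [] := by
        rw [← List.length_eq_zero_iff, hmlen, htot]
      rw [if_pos hA2, if_pos hB]
    · have hA2 : (pvCountA m (pvCrushA m n g)).2 = false := by
        rw [hci, countA_eq m hm, hsum]
        simp
        exact_mod_cast htot
      have hB : ¬(pvMarksB m n (tG m.toNat n.toNat g) = []) := by
        intro he
        apply htot
        rw [← hmlen, he]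
        rfl
      rw [if_neg (by rw [hA2]; exact Bool.false_ne_true), if_neg hB]
      have hA1 : (pvCountA m (pvCrushA m n g)).1 = ((totN m.toNat n.toNat g : Nat) : Int) := by
        rw [hci, countA_eq m hm, hsum]
      have hBlen : PySem.Set.len (pvMarksB m n (tG m.toNat n.toNat g))
          = ((totN m.toNat n.toNat g : Nat) : Int) := by
        rw [PySem.Set.len_eq, hmlen]
      rw [hA1, hBlen, hci,
        ih (cnt + ((totN m.toNat n.toNat g : Nat) : Int)) (pvGravA m n (ccG m.toNat n.toNat g) g)
          (grav_shape m n g hS),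
        grav_compact m n hm g hS]

-- ===== VERDICT (by name: the statement is the Claim_ definition above) =====
theorem solution_spec : Claim_equal_solution := by
  unfold Claim_equal_solution
  intro m n board _ hpre
  unfold Spec_solution
  obtain ⟨hm, hlen, hrow⟩ := hpre
  unfold solution solution_alt
  set M := m.toNat with hMdef
  set N := n.toNat with hNdef
  set g0 : List (List Char) := board.map String.toList with hg0def
  have hg0len : g0.length = board.length := by rw [hg0def, List.length_map]
  have hMle : M ≤ board.length := by
    have h1 : (M : Int) ≤ (board.length : Int) := by omega
    exact_mod_cast h1
  have hS0 : ShapeG M N g0 := by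
    constructor
    · rw [hg0len]; exact hMle
    · intro i hi
      have hib : i < board.length := lt_of_lt_of_le hi hMle
      have hrowi : g0.getD i [] = (board[i]'hib).toList := by
        rw [hg0def, getD_lt _ [] (by rw [List.length_map]; exact hib)]
        simp
      rw [hrowi]
      have hmem : board[i]'hib ∈ board.take M := by
        have hlt : i < (board.take M).length := by
          rw [List.length_take]; omega
        have hx := List.getElem_mem (l := board.take M) (n := i) hlt
        rwa [List.getElem_take] at hx
      have h2 := hrow _ hmem
      omega
  have hcols : ((PySem.List.pyRange 0 n 1).map (fun j =>
      (PySem.List.pyRange 0 m 1).map (fun i =>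
        PySem.List.pyGetD (PySem.List.pyGetD board i "").toList j ' '))) = tG M N g0 := by
    rw [pyR0 n, pyR0 m]
    unfold tG
    rw [List.map_map]
    apply List.map_congr_left
    intro j _
    simp only [Function.comp]
    rw [List.map_map]
    apply List.map_congr_left
    intro i hi
    rw [List.mem_range] at hi
    simp only [Function.comp]
    rw [PySem.List.pyGetD_natCast, PySem.List.pyGetD_natCast]
    unfold ggD
    congr 1
    rw [getD_lt _ "" (lt_of_lt_of_le hi hMle), hg0def,
      getD_lt _ [] (by rw [List.length_map]; exact lt_of_lt_of_le hi hMle)]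
    simp
  rw [hcols]
  exact loop_eq m n hm (M * N + 1) 0 g0 hS0
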